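-- pv_equiv track=rewrite | github.com/prajwalaher33/feeshr | apps/agents/feeshr_agents/built_in/reviewer.py | _is_security_sensitive
-- ===== SOURCE A (Python) =====
-- from typing import List
--
-- def _is_security_sensitive(file_paths: List[str]) -> bool:
--     """
--     Determine if a PR touches security-sensitive files.
--
--     Args:
--         file_paths: List of changed file paths
--
--     Returns:
--         True if any file is in a security-sensitive area
--     """
--     sensitive_patterns = [
--         "auth", "crypto", "password", "token", "secret",
--         "sql", "query", "database", "network", "http",
--         "file", "path", "upload", "download",
--     ]
--     for path in file_paths:
--         path_lower = path.lower()
--         if any(pattern in path_lower for pattern in sensitive_patterns):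
--             return True
--     return False
-- ===== SOURCE B (Python) =====
-- from typing import List
--
-- _SENSITIVE = [
--     "auth", "crypto", "password", "token", "secret",
--     "sql", "query", "database", "network", "http",
--     "file", "path", "upload", "download",
-- ]
--
-- # first-letter dispatch table: char -> keywords starting with it
-- _BY_FIRST = {}
-- for _k in _SENSITIVE:
--     _BY_FIRST.setdefault(_k[0], []).append(_k)
--
-- def _is_security_sensitive(file_paths: List[str]) -> bool:
--     """Single left-to-right scan of each lowercased path: at every position,
--     only the keywords whose first letter matches the current character are
--     tested as prefixes of the remaining suffix."""
--     for path in file_paths: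
--         s = path.lower()
--         for i, c in enumerate(s):
--             for k in _BY_FIRST.get(c, ()):
--                 if s[i:].startswith(k):
--                     return True
--     return False
-- ===== Notes on version B (the rewrite author's own statement) =====
-- stated objective: alternative
-- what changed: Instead of testing all 14 keywords as substrings of each lowercased path (library substring search per keyword), B precomputes a first-letter dispatch table and makes one positional left-to-right scan of each path, testing as prefixes at each position only the keywords whose first letter matches the current character.
import Mathlib
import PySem

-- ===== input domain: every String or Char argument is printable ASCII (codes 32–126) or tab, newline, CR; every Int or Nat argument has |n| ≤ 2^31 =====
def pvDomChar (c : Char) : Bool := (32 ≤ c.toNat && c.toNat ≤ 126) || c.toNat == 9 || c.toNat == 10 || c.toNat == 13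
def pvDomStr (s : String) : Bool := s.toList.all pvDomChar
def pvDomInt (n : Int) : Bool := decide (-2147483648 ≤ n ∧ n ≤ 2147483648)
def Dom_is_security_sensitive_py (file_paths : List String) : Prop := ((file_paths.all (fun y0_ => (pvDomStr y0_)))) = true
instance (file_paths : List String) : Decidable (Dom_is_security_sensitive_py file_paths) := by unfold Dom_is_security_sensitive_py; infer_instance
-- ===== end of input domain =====

-- B replaces A's pattern-major loop (14 library substring searches per path) by one positional
-- left-to-right scan of each lowercased path with a first-letter dispatch table (objective: alternative).

-- ===== PORT A =====
def sensitive_patterns : List String :=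
  ["auth", "crypto", "password", "token", "secret",
   "sql", "query", "database", "network", "http",
   "file", "path", "upload", "download"]

-- for path: if any(pattern in path_lower for pattern in …): return True / return False  ⇒  List.any
def is_security_sensitive_py (file_paths : List String) : Bool :=
  file_paths.any (fun path =>
    let path_lower := PySem.Str.lower path
    sensitive_patterns.any (fun pattern => PySem.Str.isIn pattern path_lower))

-- ===== PORT B =====
def bSensitive : List String :=
  ["auth", "crypto", "password", "token", "secret",
   "sql", "query", "database", "network", "http",
   "file", "path", "upload", "download"]

-- _BY_FIRST: the module-level setdefault/append loop; _BY_FIRST.setdefault(k[0], []).append(k)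
-- extends the stored (or fresh empty) list in place, i.e. insert (getD ++ [k]) — exact here.
def bByFirst : PySem.Dict Char (List String) :=
  bSensitive.foldl
    (fun d k => d.insert (k.toList.headD ' ') (d.getD (k.toList.headD ' ') [] ++ [k]))
    PySem.Dict.empty

-- for i, c in enumerate(s): for k in _BY_FIRST.get(c, ()): if s[i:].startswith(k): return True
def is_security_sensitive_py_alt (file_paths : List String) : Bool :=
  file_paths.any (fun path =>
    let s := (PySem.Str.lower path).toList
    (PySem.List.enumerate s 0).any (fun ic =>
      (bByFirst.getD ic.2 []).any (fun k =>
        PySem.Chars.startswith (PySem.List.slice s (some ic.1) none) k.toList)))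

-- ===== PRECONDITION & SPEC =====
def Spec_is_security_sensitive_py (file_paths : List String) (out : Bool) : Prop := out = is_security_sensitive_py_alt file_paths
instance (file_paths : List String) (out : Bool) : Decidable (Spec_is_security_sensitive_py file_paths out) := by unfold Spec_is_security_sensitive_py; infer_instance

-- ===== CLAIM (what is proved, stated in full; the proofs are below) =====
def Claim_equal_is_security_sensitive_py : Prop := ∀ (file_paths : List String), Dom_is_security_sensitive_py file_paths → Spec_is_security_sensitive_py file_paths (is_security_sensitive_py file_paths)

-- ===== LEMMAS AND PROOFS =====

-- the dispatch table, evaluated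
set_option maxRecDepth 4000 in
lemma bByFirst_eq : bByFirst = PySem.Dict.mk
    [('a', ["auth"]), ('c', ["crypto"]), ('p', ["password", "path"]), ('t', ["token"]),
     ('s', ["secret", "sql"]), ('q', ["query"]), ('d', ["database", "download"]),
     ('n', ["network"]), ('h', ["http"]), ('f', ["file"]), ('u', ["upload"])] := by decide

-- lookup in the dispatch table = membership in the keyword list with matching first letter
set_option maxHeartbeats 1000000 in
lemma mem_getD_bByFirst (c : Char) (k : String) :
    k ∈ bByFirst.getD c [] ↔ k ∈ bSensitive ∧ k.toList.head? = some c := by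
  rw [bByFirst_eq]
  simp only [PySem.Dict.getD_eq_get?_getD, PySem.Dict.get?_mk_cons]
  split_ifs <;> simp only [beq_iff_eq] at * <;> (try subst_vars) <;>
    simp only [Option.getD_some, bSensitive] <;>
    (constructor
     · intro h
       fin_cases h <;> decide
     · rintro ⟨hm, hh⟩
       fin_cases hm <;> revert hh <;> simp_all)

-- a nonempty prefix pins down the head
lemma head?_of_prefix {p l : List Char} (h : p <+: l) (hp : p ≠ []) : p.head? = l.head? := by
  rcases h with ⟨t, rfl⟩; cases p <;> simp_all

-- one path: A's 14 substring tests ↔ B's positional scan with first-letter dispatch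
lemma per_path (s : List Char) :
    (sensitive_patterns.any (fun pattern => PySem.Chars.isIn pattern.toList s))
    = (PySem.List.enumerate s 0).any (fun ic =>
        (bByFirst.getD ic.2 []).any (fun k =>
          PySem.Chars.startswith (PySem.List.slice s (some ic.1) none) k.toList)) := by
  rw [Bool.eq_iff_iff]
  simp only [List.any_eq_true]
  constructor
  · rintro ⟨p, hp, hin⟩
    obtain ⟨j, hpre⟩ := (PySem.Chars.exists_prefix_drop_iff_isIn (sub := p.toList) (s := s)).mpr hin
    have hne : p.toList ≠ [] := by fin_cases hp <;> decide
    have hj : j < s.length := by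
      by_contra hge
      rw [List.drop_eq_nil_of_le (by omega)] at hpre
      exact hne (List.prefix_nil.mp hpre)
    refine ⟨((0 : Int) + (j : Nat), s[j]), ?_, p, ?_, ?_⟩
    · exact (PySem.List.mem_enumerate_iff _ _ _).mpr ⟨j, hj, rfl⟩
    · refine (mem_getD_bByFirst _ _).mpr ⟨by simpa [bSensitive, sensitive_patterns] using hp, ?_⟩
      rw [head?_of_prefix hpre hne, List.head?_drop, List.getElem?_eq_getElem hj]
    · have : ((0 : Int) + (j : Nat)) = ((j : Nat) : Int) := by omega
      rw [this, PySem.List.slice_from_natCast]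
      exact (PySem.Chars.startswith_iff _ _).mpr hpre
  · rintro ⟨ic, hic, k, hk, hsw⟩
    obtain ⟨j, hj, rfl⟩ := (PySem.List.mem_enumerate_iff _ _ _).mp hic
    obtain ⟨hkmem, -⟩ := (mem_getD_bByFirst _ _).mp hk
    refine ⟨k, by simpa [bSensitive, sensitive_patterns] using hkmem, ?_⟩
    have : ((0 : Int) + (j : Nat)) = ((j : Nat) : Int) := by omega
    rw [this, PySem.List.slice_from_natCast] at hsw
    exact (PySem.Chars.exists_prefix_drop_iff_isIn _ _).mp
      ⟨j, (PySem.Chars.startswith_iff _ _).mp hsw⟩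

-- ===== VERDICT (by name: the statement is the Claim_ definition above) =====
theorem is_security_sensitive_py_spec : Claim_equal_is_security_sensitive_py := by
  intro file_paths _
  unfold Spec_is_security_sensitive_py is_security_sensitive_py is_security_sensitive_py_alt
  congr 1
  funext path
  simpa using per_path (PySem.Str.lower path).toList
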